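-- pv_equiv track=rewrite | github.com/yeagerd/adminee | services/user/utils/validation.py | validate_json_safe_string
-- ===== SOURCE A (Python) =====
-- from typing import Any, List, Optional, Set
--
-- class ValidationError(ValueError):
--     """Custom validation error with field context."""
--
--     def __init__(self, field: str, value: Any, reason: str):
--         self.field = field
--         self.value = value
--         self.reason = reason
--         super().__init__(f"Validation error for {field}: {reason}")
--
-- def validate_json_safe_string(text: str, field_name: str = "text") -> str:
--     """
--     Validate that string is safe for JSON serialization.
--
--     Args:
--         text: Text to validate
--         field_name: Name of the field for error messages
--
--     Returns:
--         Validated text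
--
--     Raises:
--         ValidationError: If text contains unsafe characters
--     """
--     if not text or not text.strip():
--         raise ValidationError(field_name, text, f"{field_name} cannot be empty")
--
--     text = text.strip()
--
--     # Check for control characters that could break JSON
--     control_chars = [
--         chr(i) for i in range(32) if i not in [9, 10, 13]
--     ]  # Allow tab, LF, CR
--     for char in control_chars:
--         if char in text:
--             raise ValidationError(
--                 field_name, text, f"{field_name} contains unsafe control characters"
--             )
--
--     # Check for unpaired surrogate characters
--     try:
--         text.encode("utf-8").decode("utf-8")
--     except UnicodeError:
--         raise ValidationError(
--             field_name, text, f"{field_name} contains invalid Unicode characters"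
--         )
--
--     return text
-- ===== SOURCE B (Python) =====
-- from typing import Any
--
--
-- class ValidationError(ValueError):
--     """Custom validation error with field context."""
--
--     def __init__(self, field: str, value: Any, reason: str):
--         self.field = field
--         self.value = value
--         self.reason = reason
--         super().__init__(f"Validation error for {field}: {reason}")
--
--
-- def validate_json_safe_string(text: str, field_name: str = "text") -> str:
--     """Validate that a string is safe for JSON serialization, in one pass."""
--     stripped = text.strip()
--     if not stripped:
--         raise ValidationError(field_name, text, f"{field_name} cannot be empty")
--
--     for c in stripped:
--         o = ord(c)
--         if o < 32 and o not in (9, 10, 13):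
--             raise ValidationError(
--                 field_name, stripped, f"{field_name} contains unsafe control characters"
--             )
--         if 0xD800 <= o <= 0xDFFF:
--             raise ValidationError(
--                 field_name, stripped, f"{field_name} contains invalid Unicode characters"
--             )
--
--     return stripped
-- ===== Notes on version B (the rewrite author's own statement) =====
-- stated objective: simpler
-- what changed: B makes a single pass over the stripped text testing each character's code point (control range and surrogate range) instead of A's 29 separate full-string substring scans plus a UTF-8 encode/decode round-trip; Pre_ excludes empty or whitespace-only text, on which A raises ValidationError.
import Mathlib
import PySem

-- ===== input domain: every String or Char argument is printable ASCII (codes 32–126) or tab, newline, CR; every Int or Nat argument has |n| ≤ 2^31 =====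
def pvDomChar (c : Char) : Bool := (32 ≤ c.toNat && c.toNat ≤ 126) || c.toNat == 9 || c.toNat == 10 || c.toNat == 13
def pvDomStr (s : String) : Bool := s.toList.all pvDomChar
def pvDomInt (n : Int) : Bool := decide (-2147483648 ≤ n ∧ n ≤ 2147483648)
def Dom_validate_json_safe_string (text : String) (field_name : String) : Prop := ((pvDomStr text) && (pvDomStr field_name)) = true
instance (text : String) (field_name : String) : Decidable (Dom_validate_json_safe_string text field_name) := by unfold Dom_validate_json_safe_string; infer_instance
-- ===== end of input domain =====

-- B replaces A's 29 full-string substring scans (one per forbidden control character)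
-- by a single pass over the stripped text testing each character's code point.

-- ===== PORT A =====
-- A raises ValidationError on its error paths; those inputs are outside Pre_, the port returns "" there.
def validate_json_safe_string (text : String) (field_name : String) : String :=
  if text = "" ∨ PySem.Str.strip text = "" then
    ""  -- raise ValidationError(field_name, text, "… cannot be empty"): outside Pre_
  else
    let t := PySem.Str.strip text
    let control_chars : List Char :=
      ((PySem.List.pyRange 0 32 1).filter (fun i => !(i == 9 || i == 10 || i == 13))).map
        (fun i => Char.ofNat i.toNat)
    if control_chars.any (fun ch => PySem.Str.isIn (String.ofList [ch]) t) then
      ""  -- raise ValidationError(…, "… contains unsafe control characters"): outside Pre_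
    else
      -- text.encode("utf-8").decode("utf-8"): a Lean Char is always a valid Unicode
      -- scalar value, so the try-block never raises and the port falls through.
      t

-- ===== PORT B =====
def validate_json_safe_string_alt (text : String) (field_name : String) : String :=
  let stripped := PySem.Str.strip text
  if stripped = "" then
    ""  -- raise ValidationError: outside Pre_
  else if stripped.toList.any (fun c =>
        (decide (c.toNat < 32) && !(c.toNat == 9 || c.toNat == 10 || c.toNat == 13)) ||
        (decide (0xD800 ≤ c.toNat) && decide (c.toNat ≤ 0xDFFF))) then
    ""  -- raise ValidationError (first offending character): outside Pre_
  else
    stripped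

-- ===== PRECONDITION & SPEC =====
-- A raises ValidationError on empty or whitespace-only text (and, on inputs outside the
-- printable-ASCII domain, on control characters); Pre_ excludes exactly the inputs where A raises.
def Pre_validate_json_safe_string (text : String) (field_name : String) : Prop :=
  PySem.Str.strip text ≠ ""
instance (text : String) (field_name : String) : Decidable (Pre_validate_json_safe_string text field_name) := by unfold Pre_validate_json_safe_string; infer_instance

def pvWitness_validate_json_safe_string : String × String := ("  hello ", "text")

def Spec_validate_json_safe_string (text : String) (field_name : String) (out : String) : Prop := out = validate_json_safe_string_alt text field_name
instance (text : String) (field_name : String) (out : String) : Decidable (Spec_validate_json_safe_string text field_name out) := by unfold Spec_validate_json_safe_string; infer_instance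

-- ===== CLAIM =====
def Claim_equal_validate_json_safe_string : Prop := ∀ (text : String) (field_name : String), Dom_validate_json_safe_string text field_name → Pre_validate_json_safe_string text field_name → Spec_validate_json_safe_string text field_name (validate_json_safe_string text field_name)

-- ===== LEMMAS AND PROOFS =====

-- a character of the stripped string is a character of the original string
theorem mem_of_mem_strip (c : Char) (l : List Char) (h : c ∈ PySem.Chars.strip l) : c ∈ l := by
  unfold PySem.Chars.strip PySem.Chars.rstrip PySem.Chars.lstrip at h
  exact (List.dropWhile_sublist _).subset
    (List.mem_reverse.mp ((List.dropWhile_sublist _).subset (List.mem_reverse.mp h)))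

theorem strip_dom (text : String) (hd : pvDomStr text = true) (c : Char)
    (hc : c ∈ (PySem.Str.strip text).toList) :
    32 ≤ c.toNat ∧ c.toNat ≤ 126 ∨ c.toNat = 9 ∨ c.toNat = 10 ∨ c.toNat = 13 := by
  rw [PySem.Str.toList_strip] at hc
  have hmem : c ∈ text.toList := mem_of_mem_strip c _ hc
  have := (List.all_eq_true.mp hd) c hmem
  simp [pvDomChar] at this
  omega

theorem validate_json_safe_string_spec : Claim_equal_validate_json_safe_string := by
  intro text field_name hDom hPre
  unfold Pre_validate_json_safe_string at hPre
  have hdomt : pvDomStr text = true := by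
    unfold Dom_validate_json_safe_string at hDom
    exact ((Bool.and_eq_true _ _).mp hDom).1
  unfold Spec_validate_json_safe_string validate_json_safe_string validate_json_safe_string_alt
  have htext : ¬ (text = "" ∨ PySem.Str.strip text = "") := by
    rintro (h | h)
    · subst h; exact hPre (by decide)
    · exact hPre h
  rw [if_neg htext, if_neg hPre]
  -- A's control-character scan finds nothing: no character of the stripped text is a control char
  have hA : (((PySem.List.pyRange 0 32 1).filter (fun i => !(i == 9 || i == 10 || i == 13))).map
      (fun i => Char.ofNat i.toNat)).any
      (fun ch => PySem.Str.isIn (String.ofList [ch]) (PySem.Str.strip text)) = false := by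
    rw [List.any_eq_false]
    intro ch hch
    have hcode : ch.toNat < 32 ∧ ch.toNat ≠ 9 ∧ ch.toNat ≠ 10 ∧ ch.toNat ≠ 13 := by
      simp only [List.mem_map, List.mem_filter] at hch
      obtain ⟨i, ⟨hi, hp⟩, rfl⟩ := hch
      rw [PySem.List.mem_pyRange_one] at hi
      simp only [Bool.not_eq_true', Bool.or_eq_false_iff, beq_eq_false_iff_ne, ne_eq] at hp
      have hvalid : (i.toNat).isValidChar := Or.inl (by omega)
      rw [Char.toNat_ofNat, if_pos hvalid]
      omega
    simp only [Bool.not_eq_true]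
    rw [Bool.eq_false_iff]
    intro hIn
    have hinf := (PySem.Str.isIn_iff_infix _ _).mp hIn
    have hmem : ch ∈ (PySem.Str.strip text).toList := by
      rw [String.toList_ofList] at hinf
      exact hinf.subset (List.mem_singleton_self ch)
    have := strip_dom text hdomt ch hmem
    omega
  -- B's single pass finds nothing either
  have hB : ((PySem.Str.strip text).toList.any (fun c =>
        (decide (c.toNat < 32) && !(c.toNat == 9 || c.toNat == 10 || c.toNat == 13)) ||
        (decide (0xD800 ≤ c.toNat) && decide (c.toNat ≤ 0xDFFF)))) = false := by
    rw [List.any_eq_false]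
    intro c hc
    have := strip_dom text hdomt c hc
    simp only [Bool.or_eq_true, Bool.and_eq_true, decide_eq_true_eq, Bool.not_eq_true',
      Bool.or_eq_false_iff, beq_eq_false_iff_ne, ne_eq]
    omega
  simp only [hA, hB, if_false, Bool.false_eq_true]

-- ===== VERDICT =====
-- (theorem above is the verdict; stated by name)
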